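-- pv_equiv track=rewrite | github.com/daniel-reich/ubiquitous-fiesta | Aj377wZtxWya7gjK9_11.py | sum_missing_numbers
-- ===== SOURCE A (Python) =====
-- def sum_missing_numbers(lst):
--   lst = sorted(lst)
--   total = 0
--   for i in range(len(lst)-1):
--     if lst[i+1] - lst[i] != 1:
--       for i in range(lst[i]+1,lst[i+1]):
--         total += i
--   return total
-- ===== SOURCE B (Python) =====
-- def sum_missing_numbers(lst):
--     s = sorted(lst)
--     return sum((a + b) * (b - a - 1) // 2 for a, b in zip(s, s[1:]) if b - a > 1)
-- ===== Notes on version B (the rewrite author's own statement) =====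
-- stated objective: faster
-- what changed: Replaces the inner loop over every missing integer in each gap by the arithmetic-series closed form (a+b)*(b-a-1)//2 per adjacent pair, summed over zip(s, s[1:]).
import Mathlib
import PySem

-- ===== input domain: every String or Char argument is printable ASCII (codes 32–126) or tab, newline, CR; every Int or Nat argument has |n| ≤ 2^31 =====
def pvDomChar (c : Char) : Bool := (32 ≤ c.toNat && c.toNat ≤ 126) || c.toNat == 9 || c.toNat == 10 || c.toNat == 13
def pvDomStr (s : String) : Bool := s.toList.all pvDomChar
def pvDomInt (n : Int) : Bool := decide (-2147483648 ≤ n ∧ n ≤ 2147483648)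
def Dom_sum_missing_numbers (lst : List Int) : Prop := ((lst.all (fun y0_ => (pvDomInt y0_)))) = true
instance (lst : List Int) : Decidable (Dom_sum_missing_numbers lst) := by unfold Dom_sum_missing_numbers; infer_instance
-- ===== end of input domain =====

-- ===== PORT A =====
-- A: sort, then for each adjacent index pair with gap ≠ 1, add every integer strictly between.
def sum_missing_numbers (lst : List Int) : Int :=
  let s := PySem.List.sorted lst (fun x => x) false
  (PySem.List.pyRange 0 ((s.length : Int) - 1) 1).foldl
    (fun total i =>
      if PySem.List.pyGetD s (i + 1) 0 - PySem.List.pyGetD s i 0 ≠ 1 then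
        (PySem.List.pyRange (PySem.List.pyGetD s i 0 + 1) (PySem.List.pyGetD s (i + 1) 0) 1).foldl
          (fun t j => t + j) total
      else total) 0

-- ===== PORT B =====
-- B: closed-form arithmetic series per gap, summed over zip(s, s[1:]).
def sum_missing_numbers_alt (lst : List Int) : Int :=
  let s := PySem.List.sorted lst (fun x => x) false
  (((s.zip (PySem.List.slice s (some 1) none)).filter (fun p => p.2 - p.1 > 1)).map
    (fun p => PySem.Int.floordiv ((p.1 + p.2) * (p.2 - p.1 - 1)) 2)).sum

-- ===== PRECONDITION & SPEC =====
def Spec_sum_missing_numbers (lst : List Int) (out : Int) : Prop := out = sum_missing_numbers_alt lst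
instance (lst : List Int) (out : Int) : Decidable (Spec_sum_missing_numbers lst out) := by unfold Spec_sum_missing_numbers; infer_instance

-- ===== CLAIM (what is proved, stated in full; the proofs are below) =====
def Claim_equal_sum_missing_numbers : Prop := ∀ (lst : List Int), Dom_sum_missing_numbers lst → Spec_sum_missing_numbers lst (sum_missing_numbers lst)

-- ===== LEMMAS AND PROOFS =====

-- twice the sum of range(a, b) in closed form
theorem pv_two_mul_sum_pyRange (a b : Int) (h : a ≤ b) :
    2 * (PySem.List.pyRange a b 1).sum = (a + b - 1) * (b - a) := by
  obtain ⟨n, hn⟩ : ∃ n : Nat, b = a + n := ⟨(b - a).toNat, by omega⟩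
  subst hn
  induction n with
  | zero => simp [PySem.List.pyRange_one_eq_nil]
  | succ k ih =>
    rw [show (a + ((k + 1 : Nat) : Int)) = (a + (k : Nat)) + 1 by push_cast; ring,
        PySem.List.pyRange_one_succ_right (by push_cast; omega)]
    rw [List.sum_append, List.sum_cons, List.sum_nil]
    have ih' := ih (by push_cast; omega)
    push_cast at ih' ⊢
    linear_combination ih'

-- the per-pair contribution: A's inner loop equals B's guarded closed form
theorem pv_pair_step (t a b : Int) :
    (if b - a ≠ 1 then (PySem.List.pyRange (a + 1) b 1).foldl (fun t j => t + j) t else t)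
      = t + (if b - a > 1 then PySem.Int.floordiv ((a + b) * (b - a - 1)) 2 else 0) := by
  by_cases hgt : b - a > 1
  · rw [if_pos (by omega), if_pos hgt,
        PySem.List.foldl_add (PySem.List.pyRange (a + 1) b 1) (fun j => j) t]
    simp only [List.map_id_fun', id]
    have h2 : 2 * (PySem.List.pyRange (a + 1) b 1).sum = (a + b) * (b - a - 1) := by
      have := pv_two_mul_sum_pyRange (a + 1) b (by omega)
      linear_combination this
    rw [← h2, PySem.Int.floordiv_eq_ediv_of_pos (by omega)]
    omega
  · by_cases heq : b - a = 1
    · rw [if_neg (by omega), if_neg hgt]; ring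
    · rw [if_pos (by omega), if_neg hgt,
          PySem.List.pyRange_one_eq_nil (by omega)]
      simp

-- indices 0..len-2 paired with their successors are exactly zip s s.tail (Nat form)
theorem pv_range_zip_nat (g : Int → Int → Int) :
    ∀ (s : List Int),
      (List.range (s.length - 1)).map (fun k => g (s.getD k 0) (s.getD (k + 1) 0))
        = (s.zip s.tail).map (fun p => g p.1 p.2)
  | [] => by simp
  | [x] => by simp
  | x :: y :: t => by
    have ih := pv_range_zip_nat g (y :: t)
    simp only [List.length_cons, Nat.add_sub_cancel, List.range_succ_eq_map,
      List.map_cons, List.map_map, List.zip_cons_cons, List.tail_cons]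
    refine congrArg₂ _ rfl ?_
    simpa [Function.comp, List.getD_cons_succ] using ih

-- the same over pyRange with Python indexing
theorem pv_range_zip (g : Int → Int → Int) (s : List Int) :
    (PySem.List.pyRange 0 ((s.length : Int) - 1) 1).map
        (fun i => g (PySem.List.pyGetD s i 0) (PySem.List.pyGetD s (i + 1) 0))
      = (s.zip s.tail).map (fun p => g p.1 p.2) := by
  rw [PySem.List.pyRange_one, List.map_map, ← pv_range_zip_nat g s]
  have hlen : (((s.length : Int) - 1 - 0).toNat) = s.length - 1 := by omega
  rw [hlen]
  refine List.map_congr_left (fun k hk => ?_)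
  have : ((0 : Int) + (k : Nat)) = ((k : Nat) : Int) := by ring
  simp only [Function.comp, this]
  rw [show ((k : Nat) : Int) + 1 = ((k + 1 : Nat) : Int) by push_cast; ring,
      PySem.List.pyGetD_natCast, PySem.List.pyGetD_natCast]

-- a filtered-then-mapped sum is a sum of a guarded map
theorem pv_sum_filter_map {α : Type} (p : α → Bool) (f : α → Int) :
    ∀ (xs : List α),
      ((xs.filter p).map f).sum = (xs.map (fun x => if p x then f x else 0)).sum
  | [] => by simp
  | x :: xs => by
    by_cases h : p x <;>
      simp [List.filter_cons, h, pv_sum_filter_map p f xs]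

-- ===== VERDICT (by name: the statement is the Claim_ definition above) =====
theorem sum_missing_numbers_spec : Claim_equal_sum_missing_numbers := by
  intro lst _
  unfold Spec_sum_missing_numbers sum_missing_numbers sum_missing_numbers_alt
  dsimp only
  set s := PySem.List.sorted lst (fun x => x) false with hs
  have hbody :
      (fun (total i : Int) =>
        if PySem.List.pyGetD s (i + 1) 0 - PySem.List.pyGetD s i 0 ≠ 1 then
          (PySem.List.pyRange (PySem.List.pyGetD s i 0 + 1) (PySem.List.pyGetD s (i + 1) 0) 1).foldl
            (fun t j => t + j) total
        else total)
      = (fun (total i : Int) => total +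
          (if PySem.List.pyGetD s (i + 1) 0 - PySem.List.pyGetD s i 0 > 1 then
            PySem.Int.floordiv ((PySem.List.pyGetD s i 0 + PySem.List.pyGetD s (i + 1) 0) *
              (PySem.List.pyGetD s (i + 1) 0 - PySem.List.pyGetD s i 0 - 1)) 2
          else 0)) := by
    funext t i
    exact pv_pair_step t (PySem.List.pyGetD s i 0) (PySem.List.pyGetD s (i + 1) 0)
  rw [hbody, PySem.List.foldl_add, zero_add, PySem.List.slice_from_one,
      pv_range_zip (fun a b => if b - a > 1 then
        PySem.Int.floordiv ((a + b) * (b - a - 1)) 2 else 0) s]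
  rw [pv_sum_filter_map]
  simp
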